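-- pv_equiv track=rewrite | github.com/Sekai02/daa-project-2025 | utils/validators/validator.py | _bfs_reaches_any
-- ===== SOURCE A (Python) =====
-- from typing import List, Tuple, Optional, Set
-- from collections import deque
--
-- def _bfs_reaches_any(adj: List[List[int]], start: int, targets: Set[int]) -> bool:
--     """
--     Check if start node can reach any node in targets using BFS.
--
--     Args:
--         adj: Adjacency list
--         start: Starting node
--         targets: Set of target nodes
--
--     Returns:
--         True if any target is reachable from start
--     """
--     if start in targets:
--         return True
--
--     visited = set([start])
--     queue = deque([start])
--
--     while queue:
--         node = queue.popleft()
--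
--         for neighbor in adj[node]:
--             if neighbor in targets:
--                 return True
--
--             if neighbor not in visited:
--                 visited.add(neighbor)
--                 queue.append(neighbor)
--
--     return False
-- ===== SOURCE B (Python) =====
-- from typing import List, Set
--
-- def _bfs_reaches_any(adj: List[List[int]], start: int, targets: Set[int]) -> bool:
--     # Two-phase: saturate the full reachable set with a round-based fixpoint
--     # (no target tests during traversal), then answer by one intersection.
--     if start in targets:
--         return True
--     reachable = {start}
--     frontier = {start}
--     while frontier:
--         frontier = {x for n in frontier for x in adj[n] if x not in reachable}
--         reachable |= frontier
--     return not reachable.isdisjoint(targets)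
-- ===== Notes on version B (the rewrite author's own statement) =====
-- stated objective: alternative
-- what changed: A is a single-phase BFS with a queue and an early return testing every neighbor against targets inside the traversal; B is two-phase: it first saturates the complete reachable set by a round-based fixpoint with no target test at all, then answers with one set intersection at the end.
-- outside the precondition, e.g. on _bfs_reaches_any([[7, 1]], 0, {7}): A returns True, B raises IndexError; on _bfs_reaches_any([[], [9]], 0, set()): A returns False, B returns False
import Mathlib
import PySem

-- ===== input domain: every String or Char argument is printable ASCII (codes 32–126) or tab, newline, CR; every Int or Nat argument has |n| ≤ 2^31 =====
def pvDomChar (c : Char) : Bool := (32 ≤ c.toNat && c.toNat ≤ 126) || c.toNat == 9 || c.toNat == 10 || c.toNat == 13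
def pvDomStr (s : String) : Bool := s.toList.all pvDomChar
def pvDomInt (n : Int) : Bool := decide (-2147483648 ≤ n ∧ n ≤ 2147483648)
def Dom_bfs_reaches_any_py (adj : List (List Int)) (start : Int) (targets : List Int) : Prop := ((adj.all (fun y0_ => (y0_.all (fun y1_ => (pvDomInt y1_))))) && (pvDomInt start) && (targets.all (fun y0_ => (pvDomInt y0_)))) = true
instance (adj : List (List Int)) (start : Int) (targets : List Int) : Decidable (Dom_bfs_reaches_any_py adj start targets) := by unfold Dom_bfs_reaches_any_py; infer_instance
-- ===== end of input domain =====

-- B replaces A's queue-based BFS (per-neighbor target test with early return inside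
-- the traversal) by a two-phase computation: a round-based saturation of the full
-- reachable set with no target test at all, followed by ONE set intersection at the end.
-- In both ports Python's IndexError (pyGet? = none) is rendered as 'false', consistently,
-- since neither Python returns a value there.

-- ===== PORT A =====
-- inner 'for neighbor in adj[node]' loop of A, with its early 'return True'
-- (none = the early return fired; some st = updated (visited, queue))
def bfsRowA (targets : List Int) : List Int → PySem.Set Int × List Int → Option (PySem.Set Int × List Int)
  | [], st => some st
  | x :: rest, (v, q) =>
    if targets.contains x then none
    else if PySem.Set.contains v x then bfsRowA targets rest (v, q)
    else bfsRowA targets rest (PySem.Set.add v x, q ++ [x])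

-- A's 'while queue' loop; fuel 2*|adj|+2 bounds the number of pops on every input
-- where the Python returns (each pop after the first consumes a distinct visited
-- in-range node value, of which there are at most 2*|adj|).
def bfsLoopA (adj : List (List Int)) (targets : List Int) : Nat → PySem.Set Int → List Int → Bool
  | 0, _, _ => false
  | _ + 1, _, [] => false
  | f + 1, v, n :: q =>
    match PySem.List.pyGet? adj n with
    | none => false
    | some row =>
      match bfsRowA targets row (v, q) with
      | none => true
      | some (v', q') => bfsLoopA adj targets f v' q'

def bfs_reaches_any_py (adj : List (List Int)) (start : Int) (targets : List Int) : Bool :=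
  if targets.contains start then true
  else bfsLoopA adj targets (2 * adj.length + 2) (PySem.Set.ofList [start]) [start]

-- ===== PORT B =====
-- '{x for x in adj[n] if x not in reachable}' contribution of one frontier node's row
def growRow (v acc : PySem.Set Int) (row : List Int) : PySem.Set Int :=
  row.foldl (fun a x => if PySem.Set.contains v x then a else PySem.Set.add a x) acc

-- the whole set comprehension over the frontier (none = IndexError on some adj[n])
def frontFold (adj : List (List Int)) (v : PySem.Set Int) : List Int → PySem.Set Int → Option (PySem.Set Int)
  | [], acc => some acc
  | n :: rest, acc =>
    match PySem.List.pyGet? adj n with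
    | none => none
    | some row => frontFold adj v rest (growRow v acc row)

-- B's 'while frontier' saturation loop; fuel 2*|adj|+3 bounds the rounds on every
-- input where the Python returns (each round but the last two strictly grows 'reachable')
def bLoop (adj : List (List Int)) (targets : List Int) : Nat → PySem.Set Int → PySem.Set Int → Bool
  | 0, _, _ => false
  | f + 1, v, front =>
    if front.isEmpty then !(PySem.Set.isdisjoint v targets)
    else
      match frontFold adj v front PySem.Set.empty with
      | none => false
      | some nf => bLoop adj targets f (PySem.Set.union v nf) nf

def bfs_reaches_any_py_alt (adj : List (List Int)) (start : Int) (targets : List Int) : Bool :=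
  if targets.contains start then true
  else bLoop adj targets (2 * adj.length + 3) (PySem.Set.ofList [start]) (PySem.Set.ofList [start])

-- ===== PRECONDITION & SPEC =====
-- all node references (start and every adjacency entry) are valid Python indices into adj
def ValidGraph (adj : List (List Int)) (start : Int) : Prop :=
  PySem.Raise.InRange adj.length start ∧ ∀ row ∈ adj, ∀ e ∈ row, PySem.Raise.InRange adj.length e

-- Pre_ excludes graphs with an out-of-range node reference (unless start is itself a
-- target): there A raises unless an early target hit pre-empts the bad index, while B,
-- which defers the target test past the full saturation, raises on more of those inputs.
def Pre_bfs_reaches_any_py (adj : List (List Int)) (start : Int) (targets : List Int) : Prop :=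
  targets.contains start = true ∨ ValidGraph adj start
instance (adj : List (List Int)) (start : Int) (targets : List Int) : Decidable (Pre_bfs_reaches_any_py adj start targets) := by unfold Pre_bfs_reaches_any_py; unfold ValidGraph; infer_instance

def pvWitness_bfs_reaches_any_py : List (List Int) × Int × List Int := ([[1], [0]], 0, [1])

def Spec_bfs_reaches_any_py (adj : List (List Int)) (start : Int) (targets : List Int) (out : Bool) : Prop := out = bfs_reaches_any_py_alt adj start targets
instance (adj : List (List Int)) (start : Int) (targets : List Int) (out : Bool) : Decidable (Spec_bfs_reaches_any_py adj start targets out) := by unfold Spec_bfs_reaches_any_py; infer_instance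

-- ===== CLAIM (what is proved, stated in full; the proofs are below) =====
def Claim_equal_bfs_reaches_any_py : Prop := ∀ (adj : List (List Int)) (start : Int) (targets : List Int), Dom_bfs_reaches_any_py adj start targets → Pre_bfs_reaches_any_py adj start targets → Spec_bfs_reaches_any_py adj start targets (bfs_reaches_any_py adj start targets)

-- ===== LEMMAS AND PROOFS =====

-- the common semantics both loops are proved against: reachability in adj from start
inductive PyReach (adj : List (List Int)) (start : Int) : Int → Prop
  | refl : PyReach adj start start
  | step {n m : Int} {row : List Int} : PyReach adj start n →
      PySem.List.pyGet? adj n = some row → m ∈ row → PyReach adj start m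

theorem reach_inRange {adj : List (List Int)} {start m : Int}
    (hVG : ValidGraph adj start) (h : PyReach adj start m) :
    PySem.Raise.InRange adj.length m := by
  induction h with
  | refl => exact hVG.1
  | step _ hrow hm _ =>
    exact hVG.2 _ (PySem.List.mem_of_pyGet?_eq_some _ hrow) _ hm

theorem reach_row {adj : List (List Int)} {start m : Int}
    (hVG : ValidGraph adj start) (h : PyReach adj start m) :
    ∃ row, PySem.List.pyGet? adj m = some row := by
  cases hrow : PySem.List.pyGet? adj m with
  | some row => exact ⟨row, rfl⟩
  | none =>
    exact absurd (reach_inRange hVG h) ((PySem.List.pyGet?_eq_none_iff _ _).1 hrow)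

-- a set containing start and closed under neighbours contains everything reachable
theorem reach_subset {adj : List (List Int)} {start : Int} {v : List Int}
    (hstart : start ∈ v)
    (hclosed : ∀ n ∈ v, ∀ row, PySem.List.pyGet? adj n = some row → ∀ x ∈ row, x ∈ v) :
    ∀ m, PyReach adj start m → m ∈ v := by
  intro m h
  induction h with
  | refl => exact hstart
  | step _ hrow hm ih => exact hclosed _ ih _ hrow _ hm

-- potential: number of still-unvisited valid node values
def unvisited (len : Nat) (v : PySem.Set Int) : Nat :=
  ((List.range (2 * len)).map (fun i : Nat => (i : Int) - (len : Int))).countP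
    (fun e => !(PySem.Set.contains v e))

theorem mem_rangeList {len : Nat} {x : Int} (h : PySem.Raise.InRange len x) :
    x ∈ (List.range (2 * len)).map (fun i : Nat => (i : Int) - (len : Int)) := by
  obtain ⟨h1, h2⟩ := h
  simp only [List.mem_map, List.mem_range]
  exact ⟨(x + len).toNat, by omega, by omega⟩

theorem countP_succ_le {p q : Int → Bool} :
    ∀ (L : List Int), (∀ e, q e = true → p e = true) →
      ∀ x ∈ L, p x = true → q x = false →
      L.countP q + 1 ≤ L.countP p := by
  intro L himp x hxL hpx hqx
  induction L with
  | nil => simp at hxL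
  | cons y rest ih =>
    rcases List.mem_cons.1 hxL with rfl | hxr
    · have := List.countP_mono_left (l := rest) (fun a _ h => himp a h)
      simp [hpx, hqx]
      omega
    · have := ih hxr
      have hy := himp y
      simp only [List.countP_cons]
      cases hq : q y
      · cases hp : p y <;> simp <;> omega
      · rw [hy hq]; simp; omega

theorem unvisited_lt {len : Nat} {v v' : PySem.Set Int} {x : Int}
    (hmono : ∀ e, e ∈ v → e ∈ v') (hx : PySem.Raise.InRange len x)
    (hxv : x ∉ v) (hxv' : x ∈ v') :
    unvisited len v' + 1 ≤ unvisited len v := by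
  refine countP_succ_le _ (fun e he => ?_) x (mem_rangeList hx) ?_ ?_
  · simp only [Bool.not_eq_eq_eq_not, Bool.not_true, PySem.Set.contains_eq_listContains] at he ⊢
    rw [Bool.eq_false_iff] at he ⊢
    exact fun hc => he (List.contains_iff_mem.2 (hmono e (List.contains_iff_mem.1 hc)))
  · simp [PySem.Set.contains_eq_listContains, hxv]
  · simp [PySem.Set.contains_eq_listContains, hxv']

theorem unvisited_le (len : Nat) (v : PySem.Set Int) : unvisited len v ≤ 2 * len := by
  calc unvisited len v ≤ ((List.range (2*len)).map (fun i : Nat => (i : Int) - (len : Int))).length :=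
        List.countP_le_length
    _ = 2 * len := by simp


-- ----- A side: one popped node's row scan, characterized -----
theorem rowA_props (targets : List Int) (row : List Int) :
    ∀ (v : PySem.Set Int) (q : List Int) (len : Nat),
      (∀ x ∈ q, x ∈ v) → q.Nodup → v.Nodup →
      (∀ x ∈ row, PySem.Raise.InRange len x) →
      (match bfsRowA targets row (v, q) with
       | none => ∃ x ∈ row, targets.contains x = true
       | some (v', q') =>
          (∀ x ∈ row, targets.contains x = false) ∧
          (∀ x, x ∈ v' ↔ x ∈ v ∨ x ∈ row) ∧
          (∀ x, x ∈ q' ↔ x ∈ q ∨ (x ∈ row ∧ x ∉ v)) ∧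
          (∀ x ∈ q', x ∈ v') ∧ q'.Nodup ∧ v'.Nodup ∧
          q'.length + unvisited len v' ≤ q.length + unvisited len v) := by
  induction row with
  | nil =>
    intro v q len hqv hqnd hvnd _
    simp only [bfsRowA]
    exact ⟨by simp, fun x => by simp, fun x => by simp, hqv, hqnd, hvnd, le_refl _⟩
  | cons y rest ih =>
    intro v q len hqv hqnd hvnd hir
    simp only [bfsRowA]
    by_cases hyt : targets.contains y = true
    · rw [if_pos hyt]
      exact ⟨y, List.mem_cons_self, hyt⟩
    · rw [if_neg hyt]
      have hyt' : targets.contains y = false := Bool.eq_false_iff.2 hyt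
      by_cases hyv : y ∈ v
      · rw [if_pos ((PySem.Set.contains_iff v y).2 hyv)]
        have hrest := ih v q len hqv hqnd hvnd (fun x hx => hir x (List.mem_cons_of_mem _ hx))
        cases hres : bfsRowA targets rest (v, q) with
        | none =>
          rw [hres] at hrest
          obtain ⟨x, hxr, hxt⟩ := hrest
          exact ⟨x, List.mem_cons_of_mem _ hxr, hxt⟩
        | some st =>
          obtain ⟨v', q'⟩ := st
          rw [hres] at hrest
          obtain ⟨h1, h2, h3, h4, h5, h6, h7⟩ := hrest
          refine ⟨?_, ?_, ?_, h4, h5, h6, h7⟩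
          · intro x hx
            rcases List.mem_cons.1 hx with rfl | hx'
            · exact hyt'
            · exact h1 x hx'
          · intro x
            rw [h2]
            constructor
            · rintro (h | h)
              · exact Or.inl h
              · exact Or.inr (List.mem_cons_of_mem _ h)
            · rintro (h | h)
              · exact Or.inl h
              · rcases List.mem_cons.1 h with rfl | h'
                · exact Or.inl hyv
                · exact Or.inr h'
          · intro x
            rw [h3]
            constructor
            · rintro (h | ⟨h, hnv⟩)
              · exact Or.inl h
              · exact Or.inr ⟨List.mem_cons_of_mem _ h, hnv⟩
            · rintro (h | ⟨h, hnv⟩)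
              · exact Or.inl h
              · rcases List.mem_cons.1 h with rfl | h'
                · exact absurd hyv hnv
                · exact Or.inr ⟨h', hnv⟩
      · rw [if_neg (fun hc => hyv ((PySem.Set.contains_iff _ y).1 hc))]
        have hynq : y ∉ q := fun hyq => hyv (hqv y hyq)
        have hqv' : ∀ x ∈ q ++ [y], x ∈ PySem.Set.add v y := by
          intro x hx
          rcases List.mem_append.1 hx with h | h
          · exact (PySem.Set.mem_add _ _ _).2 (Or.inl (hqv x h))
          · exact (PySem.Set.mem_add _ _ _).2 (Or.inr (List.mem_singleton.1 h))
        have hqnd' : (q ++ [y]).Nodup := by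
          refine List.Nodup.append hqnd (List.nodup_singleton y) ?_
          exact fun a ha hb => hynq ((List.mem_singleton.1 hb) ▸ ha)
        have hvnd' : (PySem.Set.add v y).Nodup := PySem.Set.nodup_add _ _ hvnd
        have hrest := ih (PySem.Set.add v y) (q ++ [y]) len hqv' hqnd' hvnd'
          (fun x hx => hir x (List.mem_cons_of_mem _ hx))
        cases hres : bfsRowA targets rest (PySem.Set.add v y, q ++ [y]) with
        | none =>
          rw [hres] at hrest
          obtain ⟨x, hxr, hxt⟩ := hrest
          exact ⟨x, List.mem_cons_of_mem _ hxr, hxt⟩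
        | some st =>
          obtain ⟨v', q'⟩ := st
          rw [hres] at hrest
          obtain ⟨h1, h2, h3, h4, h5, h6, h7⟩ := hrest
          refine ⟨?_, ?_, ?_, h4, h5, h6, ?_⟩
          · intro x hx
            rcases List.mem_cons.1 hx with rfl | hx'
            · exact hyt'
            · exact h1 x hx'
          · intro x
            rw [h2, PySem.Set.mem_add]
            constructor
            · rintro ((h | rfl) | h)
              · exact Or.inl h
              · exact Or.inr List.mem_cons_self
              · exact Or.inr (List.mem_cons_of_mem _ h)
            · rintro (h | h)
              · exact Or.inl (Or.inl h)
              · rcases List.mem_cons.1 h with rfl | h'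
                · exact Or.inl (Or.inr rfl)
                · exact Or.inr h'
          · intro x
            rw [h3]
            constructor
            · rintro (h | ⟨h, hnv⟩)
              · rcases List.mem_append.1 h with h' | h'
                · exact Or.inl h'
                · exact Or.inr ⟨List.mem_cons.2 (Or.inl (List.mem_singleton.1 h')), by
                    rw [List.mem_singleton.1 h']; exact hyv⟩
              · have hxv : x ∉ v := fun hc => hnv ((PySem.Set.mem_add _ _ _).2 (Or.inl hc))
                exact Or.inr ⟨List.mem_cons_of_mem _ h, hxv⟩
            · rintro (h | ⟨h, hnv⟩)
              · exact Or.inl (List.mem_append.2 (Or.inl h))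
              · rcases List.mem_cons.1 h with rfl | h'
                · exact Or.inl (List.mem_append.2 (Or.inr (List.mem_singleton.2 rfl)))
                · by_cases hxadd : x ∈ PySem.Set.add v y
                  · rcases (PySem.Set.mem_add _ _ _).1 hxadd with hc | rfl
                    · exact absurd hc hnv
                    · exact Or.inl (List.mem_append.2 (Or.inr (List.mem_singleton.2 rfl)))
                  · exact Or.inr ⟨h', hxadd⟩
          · have hdec : unvisited len (PySem.Set.add v y) + 1 ≤ unvisited len v :=
              unvisited_lt (fun e he => (PySem.Set.mem_add _ _ _).2 (Or.inl he))
                (hir y List.mem_cons_self) hyv ((PySem.Set.mem_add _ _ _).2 (Or.inr rfl))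
            have hlen : (q ++ [y]).length = q.length + 1 := by simp
            omega

-- ----- A side: the whole BFS loop, against reachability -----
theorem loopA_iff {adj : List (List Int)} {start : Int} {targets : List Int}
    (hVG : ValidGraph adj start) (hst : targets.contains start = false) :
    ∀ (f : Nat) (v : PySem.Set Int) (q : List Int),
      (∀ x ∈ v, PyReach adj start x) → start ∈ v →
      (∀ x ∈ q, x ∈ v) → q.Nodup → v.Nodup →
      (∀ n ∈ v, n ∉ q → ∀ row, PySem.List.pyGet? adj n = some row →
        ∀ x ∈ row, x ∈ v ∧ targets.contains x = false) →
      q.length + unvisited adj.length v + 1 ≤ f →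
      (bfsLoopA adj targets f v q = true ↔
        ∃ t, targets.contains t = true ∧ PyReach adj start t) := by
  intro f
  induction f with
  | zero => intro v q _ _ _ _ _ _ hfuel; omega
  | succ f ih =>
    intro v q hReach hstart hq hqnd hvnd hcl hfuel
    cases q with
    | nil =>
      simp only [bfsLoopA, Bool.false_eq_true, false_iff]
      rintro ⟨t, ht, hRt⟩
      have hsub : ∀ m, PyReach adj start m → m ∈ v :=
        reach_subset hstart (fun n hn row hrow x hx => (hcl n hn (by simp) row hrow x hx).1)
      cases hRt with
      | refl => rw [hst] at ht; exact Bool.false_ne_true ht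
      | step hRn hrow hm =>
        have hn := hsub _ hRn
        rw [(hcl _ hn (by simp) _ hrow _ hm).2] at ht
        exact Bool.false_ne_true ht
    | cons n q' =>
      have hRn : PyReach adj start n := hReach n (hq n List.mem_cons_self)
      obtain ⟨row, hrow⟩ := reach_row hVG hRn
      have hrowIn : ∀ x ∈ row, PySem.Raise.InRange adj.length x :=
        fun x hx => hVG.2 _ (PySem.List.mem_of_pyGet?_eq_some _ hrow) _ hx
      have hqsub' : ∀ x ∈ q', x ∈ v := fun x hx => hq x (List.mem_cons_of_mem _ hx)
      have hq'nd : q'.Nodup := (List.nodup_cons.1 hqnd).2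
      have hnq' : n ∉ q' := (List.nodup_cons.1 hqnd).1
      have hprops := rowA_props targets row v q' adj.length hqsub' hq'nd hvnd hrowIn
      simp only [bfsLoopA, hrow]
      cases hrw : bfsRowA targets row (v, q') with
      | none =>
        rw [hrw] at hprops
        obtain ⟨x, hxr, hxt⟩ := hprops
        simp only [true_iff]
        exact ⟨x, hxt, PyReach.step hRn hrow hxr⟩
      | some st =>
        obtain ⟨v', q2⟩ := st
        rw [hrw] at hprops
        obtain ⟨hrowT, hmemv, hmemq, hq2v, hq2nd, hv'nd, hfuel'⟩ := hprops
        apply ih v' q2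
        · intro x hx
          rcases (hmemv x).1 hx with h | h
          · exact hReach x h
          · exact PyReach.step hRn hrow h
        · exact (hmemv start).2 (Or.inl hstart)
        · exact hq2v
        · exact hq2nd
        · exact hv'nd
        · intro m hm hmq2 row2 hrow2 x hx
          by_cases hmv : m ∈ v
          · by_cases hmn : m = n
            · subst hmn
              rw [hrow] at hrow2
              cases hrow2
              exact ⟨(hmemv x).2 (Or.inr hx), hrowT x hx⟩
            · have hmq' : m ∉ q' := fun hc => hmq2 ((hmemq m).2 (Or.inl hc))
              have hmq : m ∉ n :: q' := by
                intro hc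
                rcases List.mem_cons.1 hc with h | h
                · exact hmn h
                · exact hmq' h
              have := hcl m hmv hmq row2 hrow2 x hx
              exact ⟨(hmemv x).2 (Or.inl this.1), this.2⟩
          · have hmr : m ∈ row := ((hmemv m).1 hm).resolve_left hmv
            exact absurd ((hmemq m).2 (Or.inr ⟨hmr, hmv⟩)) hmq2
        · have : (n :: q').length = q'.length + 1 := rfl
          omega

-- ----- B side: one row's contribution to the comprehension, characterized -----
theorem growRow_props (v : PySem.Set Int) (row : List Int) :
    ∀ acc : PySem.Set Int, acc.Nodup →
      (growRow v acc row).Nodup ∧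
      (∀ x, x ∈ growRow v acc row ↔ x ∈ acc ∨ (x ∈ row ∧ x ∉ v)) := by
  induction row with
  | nil => intro acc hnd; exact ⟨hnd, fun x => by simp [growRow]⟩
  | cons y rest ih =>
    intro acc hnd
    by_cases hyv : y ∈ v
    · have hstep : growRow v acc (y :: rest) = growRow v acc rest := by
        simp only [growRow, List.foldl_cons]
        rw [if_pos ((PySem.Set.contains_iff v y).2 hyv)]
      rw [hstep]
      obtain ⟨h1, h2⟩ := ih acc hnd
      refine ⟨h1, fun x => ?_⟩
      rw [h2]
      constructor
      · rintro (h | ⟨h, hnv⟩)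
        · exact Or.inl h
        · exact Or.inr ⟨List.mem_cons_of_mem _ h, hnv⟩
      · rintro (h | ⟨h, hnv⟩)
        · exact Or.inl h
        · rcases List.mem_cons.1 h with rfl | h'
          · exact absurd hyv hnv
          · exact Or.inr ⟨h', hnv⟩
    · have hstep : growRow v acc (y :: rest) = growRow v (PySem.Set.add acc y) rest := by
        simp [growRow, hyv]
      rw [hstep]
      obtain ⟨h1, h2⟩ := ih (PySem.Set.add acc y) (PySem.Set.nodup_add _ _ hnd)
      refine ⟨h1, fun x => ?_⟩
      rw [h2, PySem.Set.mem_add]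
      constructor
      · rintro ((h | rfl) | ⟨h, hnv⟩)
        · exact Or.inl h
        · exact Or.inr ⟨List.mem_cons_self, hyv⟩
        · exact Or.inr ⟨List.mem_cons_of_mem _ h, hnv⟩
      · rintro (h | ⟨h, hnv⟩)
        · exact Or.inl (Or.inl h)
        · rcases List.mem_cons.1 h with rfl | h'
          · exact Or.inl (Or.inr rfl)
          · exact Or.inr ⟨h', hnv⟩

-- ----- B side: the whole frontier comprehension, characterized -----
theorem frontFold_props {adj : List (List Int)} {start : Int}
    (hVG : ValidGraph adj start) (fl : List Int) :
    ∀ (v acc : PySem.Set Int), (∀ n ∈ fl, PyReach adj start n) → acc.Nodup →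
      ∃ nf, frontFold adj v fl acc = some nf ∧ nf.Nodup ∧
        (∀ x, x ∈ nf ↔ x ∈ acc ∨ ∃ n ∈ fl, ∃ row,
          PySem.List.pyGet? adj n = some row ∧ x ∈ row ∧ x ∉ v) := by
  induction fl with
  | nil =>
    intro v acc _ hnd
    exact ⟨acc, rfl, hnd, fun x => by simp⟩
  | cons n rest ih =>
    intro v acc hR hnd
    obtain ⟨row, hrow⟩ := reach_row hVG (hR n List.mem_cons_self)
    obtain ⟨g1, g2⟩ := growRow_props v row acc hnd
    obtain ⟨nf, heq, hnfnd, hmem⟩ := ih v (growRow v acc row)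
      (fun m hm => hR m (List.mem_cons_of_mem _ hm)) g1
    refine ⟨nf, ?_, hnfnd, fun x => ?_⟩
    · simp only [frontFold, hrow]
      exact heq
    · rw [hmem x]
      constructor
      · rintro (h | ⟨m, hm, row2, hrow2, hx, hnv⟩)
        · rcases (g2 x).1 h with h' | ⟨h', hnv⟩
          · exact Or.inl h'
          · exact Or.inr ⟨n, List.mem_cons_self, row, hrow, h', hnv⟩
        · exact Or.inr ⟨m, List.mem_cons_of_mem _ hm, row2, hrow2, hx, hnv⟩
      · rintro (h | ⟨m, hm, row2, hrow2, hx, hnv⟩)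
        · exact Or.inl ((g2 x).2 (Or.inl h))
        · rcases List.mem_cons.1 hm with rfl | hm'
          · rw [hrow] at hrow2
            cases hrow2
            exact Or.inl ((g2 x).2 (Or.inr ⟨hx, hnv⟩))
          · exact Or.inr ⟨m, hm', row2, hrow2, hx, hnv⟩

-- ----- B side: the whole saturation loop, against reachability -----
theorem loopB_iff {adj : List (List Int)} {start : Int} {targets : List Int}
    (hVG : ValidGraph adj start) (hst : targets.contains start = false) :
    ∀ (f : Nat) (v front : PySem.Set Int),
      (∀ x ∈ v, PyReach adj start x) → start ∈ v →
      (∀ x ∈ front, x ∈ v) → v.Nodup →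
      (∀ n ∈ v, n ∉ front → ∀ row, PySem.List.pyGet? adj n = some row →
        ∀ x ∈ row, x ∈ v) →
      (front = [] → 1 ≤ f) → (front ≠ [] → unvisited adj.length v + 2 ≤ f) →
      (bLoop adj targets f v front = true ↔
        ∃ t, targets.contains t = true ∧ PyReach adj start t) := by
  intro f
  induction f with
  | zero =>
    intro v front _ _ _ _ _ hf1 hf2
    by_cases h : front = []
    · exact absurd (hf1 h) (by omega)
    · exact absurd (hf2 h) (by omega)
  | succ f ih =>
    intro v front hReach hstart hfv hvnd hcl hf1 hf2
    cases front with
    | nil =>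
      simp only [bLoop, List.isEmpty_nil, if_pos]
      rw [Bool.not_eq_true', Bool.eq_false_iff, Ne, PySem.Set.isdisjoint_iff]
      push Not
      constructor
      · rintro ⟨x, hxv, hxt⟩
        exact ⟨x, List.contains_iff_mem.2 hxt, hReach x hxv⟩
      · rintro ⟨t, ht, hRt⟩
        have hsub : ∀ m, PyReach adj start m → m ∈ v :=
          reach_subset hstart (fun m hm row hrow x hx => hcl m hm (by simp) row hrow x hx)
        cases hRt with
        | refl =>
          rw [hst] at ht
          exact absurd ht Bool.false_ne_true
        | step hRn hrow hm =>
          exact ⟨t, hcl _ (hsub _ hRn) (by simp) _ hrow _ hm, List.contains_iff_mem.1 ht⟩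
    | cons n fr =>
      have hfrR : ∀ m ∈ n :: fr, PyReach adj start m := fun m hm => hReach m (hfv m hm)
      obtain ⟨nf, heq, hnfnd, hnf⟩ :=
        frontFold_props hVG (n :: fr) v PySem.Set.empty hfrR List.nodup_nil
      have hnotE : (n :: fr : List Int).isEmpty = false := rfl
      simp only [bLoop, hnotE, Bool.false_eq_true, if_neg, not_false_eq_true, heq]
      have hnfc : ∀ x, x ∈ nf ↔ ∃ m ∈ n :: fr, ∃ row,
          PySem.List.pyGet? adj m = some row ∧ x ∈ row ∧ x ∉ v := by
        intro x
        rw [hnf x]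
        simp [PySem.Set.empty]
      apply ih (PySem.Set.union v nf) nf
      · intro x hx
        rcases (PySem.Set.mem_union _ _ _).1 hx with h | h
        · exact hReach x h
        · obtain ⟨m, hm, row, hrow, hxr, _⟩ := (hnfc x).1 h
          exact PyReach.step (hfrR m hm) hrow hxr
      · exact (PySem.Set.mem_union _ _ _).2 (Or.inl hstart)
      · exact fun x hx => (PySem.Set.mem_union _ _ _).2 (Or.inr hx)
      · exact PySem.Set.nodup_union _ _ hvnd
      · intro m hm hmnf row2 hrow2 x hx
        by_cases hmv : m ∈ v
        · by_cases hmf : m ∈ n :: fr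
          · by_cases hxv : x ∈ v
            · exact (PySem.Set.mem_union _ _ _).2 (Or.inl hxv)
            · exact (PySem.Set.mem_union _ _ _).2
                (Or.inr ((hnfc x).2 ⟨m, hmf, row2, hrow2, hx, hxv⟩))
          · exact (PySem.Set.mem_union _ _ _).2 (Or.inl (hcl m hmv hmf row2 hrow2 x hx))
        · have : m ∈ nf := ((PySem.Set.mem_union _ _ _).1 hm).resolve_left hmv
          exact absurd this hmnf
      · intro _
        have := hf2 (by simp)
        omega
      · intro hne
        obtain ⟨x, hxnf⟩ := List.exists_mem_of_ne_nil nf hne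
        obtain ⟨m, hm, row, hrow, hxr, hxv⟩ := (hnfc x).1 hxnf
        have hxIn : PySem.Raise.InRange adj.length x :=
          hVG.2 _ (PySem.List.mem_of_pyGet?_eq_some _ hrow) _ hxr
        have hdec : unvisited adj.length (PySem.Set.union v nf) + 1 ≤ unvisited adj.length v :=
          unvisited_lt (fun e he => (PySem.Set.mem_union _ _ _).2 (Or.inl he)) hxIn hxv
            ((PySem.Set.mem_union _ _ _).2 (Or.inr hxnf))
        have := hf2 (by simp)
        omega

-- ===== VERDICT (by name: the statement is the Claim_ definition above) =====
theorem bfs_reaches_any_py_spec : Claim_equal_bfs_reaches_any_py := by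
  intro adj start targets _ hpre
  unfold Spec_bfs_reaches_any_py bfs_reaches_any_py bfs_reaches_any_py_alt
  by_cases hst : targets.contains start = true
  · rw [if_pos hst, if_pos hst]
  · rw [if_neg hst, if_neg hst]
    have hst' : targets.contains start = false := Bool.eq_false_iff.2 hst
    have hVG : ValidGraph adj start := hpre.resolve_left hst
    have hof : PySem.Set.ofList [start] = [start] :=
      PySem.Set.ofList_eq_self_of_nodup _ (by simp)
    rw [hof]
    have hone : ∀ x ∈ ([start] : List Int), PyReach adj start x := by
      intro x hx
      rw [List.mem_singleton.1 hx]
      exact PyReach.refl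
    have hclosed : ∀ n ∈ ([start] : List Int), n ∉ ([start] : List Int) → ∀ row,
        PySem.List.pyGet? adj n = some row → ∀ x ∈ row, x ∈ ([start] : List Int) ∧ targets.contains x = false := by
      intro n hn hnq
      exact absurd hn hnq
    have hclosedB : ∀ n ∈ ([start] : List Int), n ∉ ([start] : List Int) → ∀ row,
        PySem.List.pyGet? adj n = some row → ∀ x ∈ row, x ∈ ([start] : List Int) := by
      intro n hn hnq
      exact absurd hn hnq
    have hub := unvisited_le adj.length [start]
    have hA := loopA_iff hVG hst' (2 * adj.length + 2) [start] [start]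
      hone (by simp) (fun x hx => hx) (by simp) (by simp) hclosed (by simp; omega)
    have hB := loopB_iff hVG hst' (2 * adj.length + 3) [start] [start]
      hone (by simp) (fun x hx => hx) (by simp) hclosedB
      (by simp) (fun _ => by omega)
    exact Bool.eq_iff_iff.2 (hA.trans hB.symm)
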